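-- pv_equiv track=rewrite | github.com/dguo456/jiuzhang | two pointers/194-Find Words.py | find_next_position
-- ===== SOURCE A (Python) =====
-- def find_next_position(char, index, positions):
--     if not positions[char]:
--         return -1
--     left, right = 0, len(positions[char]) - 1
--     while left + 1 < right:
--         mid = (left + right) // 2
--         if positions[char][mid] <= index:
--             left = mid
--         else:
--             right = mid
--
--     if index <= positions[char][left]:
--         return positions[char][left]
--     if index <= positions[char][right]:
--         return positions[char][right]
--     return -1
-- ===== SOURCE B (Python) =====
-- def find_next_position(char, index, positions):
--     for p in positions[char]:
--         if p >= index: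
--             return p
--     return -1
-- ===== Notes on version B (the rewrite author's own statement) =====
-- stated objective: simpler
-- what changed: Replaces the binary-search-with-two-pointers plus the three-way final check by a single left-to-right scan that returns the first position >= index (the list is kept sorted by construction), removing the loop invariant juggling and the duplicated boundary checks.
-- outside the precondition, e.g. on find_next_position('a', 3, {'a': [9, 1, 2]}): A returns -1, B returns 9
import Mathlib
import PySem

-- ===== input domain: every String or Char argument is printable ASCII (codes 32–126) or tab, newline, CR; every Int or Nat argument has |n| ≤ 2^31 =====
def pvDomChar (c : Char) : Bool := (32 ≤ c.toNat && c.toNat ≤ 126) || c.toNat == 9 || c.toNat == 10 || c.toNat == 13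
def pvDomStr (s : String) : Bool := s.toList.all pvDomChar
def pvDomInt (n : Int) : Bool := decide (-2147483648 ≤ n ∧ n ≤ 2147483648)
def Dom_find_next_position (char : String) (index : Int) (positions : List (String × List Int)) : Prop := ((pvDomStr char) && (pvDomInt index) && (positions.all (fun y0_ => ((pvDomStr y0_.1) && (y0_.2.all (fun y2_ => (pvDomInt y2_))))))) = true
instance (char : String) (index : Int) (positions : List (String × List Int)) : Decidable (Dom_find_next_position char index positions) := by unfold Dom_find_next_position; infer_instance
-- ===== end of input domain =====

-- B replaces A's binary search + three-way boundary check by a single left-to-right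
-- scan returning the first position ≥ index (simpler; valid because the position
-- lists are sorted, which Pre_ states).

-- shared helper: positions[char] (first-match association lookup; Python raises
-- KeyError on a missing key — Pre_ excludes that, the getD default is never used inside Pre_)
def pvPoss (char : String) (positions : List (String × List Int)) : List Int :=
  ((PySem.Dict.mk positions).get? char).getD []

-- ===== PORT A =====
-- the while-loop: left, right ↦ final (left, right); terminates since right - left shrinks
def pvLoopA (ps : List Int) (index : Int) (left right : Nat) : Nat × Nat :=
  if left + 1 < right then
    let mid := (left + right) / 2
    if ps.getD mid 0 ≤ index then pvLoopA ps index mid right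
    else pvLoopA ps index left mid
  else (left, right)
termination_by right - left
decreasing_by all_goals omega

def find_next_position (char : String) (index : Int) (positions : List (String × List Int)) : Int :=
  let ps := pvPoss char positions
  if ps = [] then -1
  else
    let lr := pvLoopA ps index 0 (ps.length - 1)
    if index ≤ ps.getD lr.1 0 then ps.getD lr.1 0
    else if index ≤ ps.getD lr.2 0 then ps.getD lr.2 0
    else -1

-- ===== PORT B =====
-- for p in positions[char]: if p >= index: return p; return -1
def pvScanB (ps : List Int) (index : Int) : Int :=
  match ps with
  | [] => -1
  | p :: rest => if index ≤ p then p else pvScanB rest index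

def find_next_position_alt (char : String) (index : Int) (positions : List (String × List Int)) : Int :=
  pvScanB (pvPoss char positions) index

-- ===== PRECONDITION & SPEC =====
-- Pre_ requires char to be a key of positions (A raises KeyError otherwise) and, when the
-- position list has three or more elements, that it is sorted ascending: that is the
-- data-structure invariant A's binary search is written for — on longer unsorted lists A
-- returns accidental values (see cites); no order is required when the search is degenerate:
-- lists of length ≤ 2 (checked directly), or index below or above every stored position.
def Pre_find_next_position (char : String) (index : Int) (positions : List (String × List Int)) : Prop :=
  ((PySem.Dict.mk positions).get? char).isSome = true ∧
  ((((PySem.Dict.mk positions).get? char).getD []).length ≤ 2 ∨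
   List.Pairwise (· ≤ ·) (((PySem.Dict.mk positions).get? char).getD []) ∨
   (∀ p ∈ (((PySem.Dict.mk positions).get? char).getD []), p < index) ∨
   (∀ p ∈ (((PySem.Dict.mk positions).get? char).getD []), index < p))
instance (char : String) (index : Int) (positions : List (String × List Int)) : Decidable (Pre_find_next_position char index positions) := by unfold Pre_find_next_position; infer_instance

def pvWitness_find_next_position : String × Int × (List (String × List Int)) :=
  ("a", 3, [("a", [1, 2, 5, 5, 9]), ("b", [0])])

def Spec_find_next_position (char : String) (index : Int) (positions : List (String × List Int)) (out : Int) : Prop := out = find_next_position_alt char index positions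
instance (char : String) (index : Int) (positions : List (String × List Int)) (out : Int) : Decidable (Spec_find_next_position char index positions out) := by unfold Spec_find_next_position; infer_instance

-- ===== CLAIM (what is proved, stated in full; the proofs are below) =====
def Claim_equal_find_next_position : Prop := ∀ (char : String) (index : Int) (positions : List (String × List Int)), Dom_find_next_position char index positions → Pre_find_next_position char index positions → Spec_find_next_position char index positions (find_next_position char index positions)

-- ===== LEMMAS AND PROOFS =====

-- monotone access on a sorted list
lemma pvSorted_mono {ps : List Int} (h : List.Pairwise (· ≤ ·) ps)
    {i j : Nat} (hij : i ≤ j) (hj : j < ps.length) :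
    ps.getD i 0 ≤ ps.getD j 0 := by
  rcases eq_or_lt_of_le hij with rfl | hlt
  · exact le_refl _
  · have hi : i < ps.length := lt_of_le_of_lt hij hj
    have := List.pairwise_iff_getElem.1 h i j hi hj hlt
    simpa [List.getD_eq_getElem?_getD, List.getElem?_eq_getElem, hi, hj] using this

-- the scan returns -1 when every element is < index
lemma pvScanB_neg {ps : List Int} {index : Int} (h : ∀ p ∈ ps, p < index) :
    pvScanB ps index = -1 := by
  induction ps with
  | nil => rfl
  | cons p rest ih =>
    have hp := h p (by simp)
    simp [pvScanB, not_le.2 hp]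
    exact ih fun q hq => h q (by simp [hq])

-- the scan returns ps[i] when i is the first index with ps[i] ≥ index
lemma pvScanB_first {ps : List Int} {index : Int} {i : Nat}
    (hi : i < ps.length) (hbefore : ∀ j, j < i → ps.getD j 0 < index)
    (hge : index ≤ ps.getD i 0) :
    pvScanB ps index = ps.getD i 0 := by
  induction ps generalizing i with
  | nil => simp at hi
  | cons p rest ih =>
    cases i with
    | zero => simp_all [pvScanB]
    | succ i =>
      have h0 : p < index := by simpa using hbefore 0 (Nat.succ_pos i)
      simp only [pvScanB, if_neg (not_le.2 h0)]
      exact ih (by simpa using hi)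
        (fun j hj => by simpa using hbefore (j + 1) (by omega))
        (by simpa using hge)

-- on a sorted list holding the value `index` somewhere, the scan returns `index`
lemma pvScanB_eq_of_val {ps : List Int} {index : Int} {k : Nat}
    (hs : List.Pairwise (· ≤ ·) ps) (hk : k < ps.length)
    (hv : ps.getD k 0 = index) :
    pvScanB ps index = index := by
  induction ps generalizing k with
  | nil => simp at hk
  | cons p rest ih =>
    by_cases hp : index ≤ p
    · have hm : (p :: rest).getD 0 0 ≤ (p :: rest).getD k 0 :=
        pvSorted_mono hs (Nat.zero_le k) hk
      rw [hv] at hm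
      simp only [List.getD_cons_zero] at hm
      simp only [pvScanB, if_pos hp]
      omega
    · cases k with
      | zero => simp only [List.getD_cons_zero] at hv; omega
      | succ k =>
        simp only [pvScanB, if_neg hp]
        exact ih hs.of_cons (by simpa using hk) (by simpa using hv)

-- loop invariant for the binary search
lemma pvLoopA_inv (ps : List Int) (index : Int) (left right : Nat)
    (hr : right < ps.length) (hlr : left ≤ right)
    (hl : left = 0 ∨ ps.getD left 0 ≤ index)
    (hrr : right = ps.length - 1 ∨ index < ps.getD right 0) :
    (pvLoopA ps index left right).1 ≤ (pvLoopA ps index left right).2 ∧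
    (pvLoopA ps index left right).2 ≤ right ∧
    (pvLoopA ps index left right).2 ≤ (pvLoopA ps index left right).1 + 1 ∧
    ((pvLoopA ps index left right).1 = 0 ∨ ps.getD (pvLoopA ps index left right).1 0 ≤ index) ∧
    ((pvLoopA ps index left right).2 = ps.length - 1 ∨ index < ps.getD (pvLoopA ps index left right).2 0) := by
  revert hr hlr hl hrr
  induction left, right using pvLoopA.induct ps index with
  | case1 l r hcond mid hm ih =>
    intro hr hlr hl hrr
    have hmid : mid = (l + r) / 2 := rfl
    clear_value mid
    subst hmid
    rw [pvLoopA, if_pos hcond]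
    have hm' : ps.getD ((l + r) / 2) 0 ≤ index := hm
    rw [if_pos hm']
    obtain ⟨a, b, c, d, e⟩ := ih hr (by omega) (Or.inr hm) hrr
    exact ⟨a, by omega, c, d, e⟩
  | case2 l r hcond mid hm ih =>
    intro hr hlr hl hrr
    have hmid : mid = (l + r) / 2 := rfl
    clear_value mid
    subst hmid
    rw [pvLoopA, if_pos hcond]
    have hm' : ¬ ps.getD ((l + r) / 2) 0 ≤ index := hm
    rw [if_neg hm']
    obtain ⟨a, b, c, d, e⟩ := ih (by omega) (by omega) hl (Or.inr (by omega))
    exact ⟨a, by omega, c, d, e⟩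
  | case3 l r hcond =>
    intro hr hlr hl hrr
    rw [pvLoopA, if_neg hcond]
    exact ⟨hlr, le_refl _, by omega, hl, hrr⟩

-- core equivalence on a nonempty sorted list
lemma pvCore (ps : List Int) (index : Int)
    (hne : ps ≠ []) (hs : List.Pairwise (· ≤ ·) ps) :
    (let lr := pvLoopA ps index 0 (ps.length - 1)
     if index ≤ ps.getD lr.1 0 then ps.getD lr.1 0
     else if index ≤ ps.getD lr.2 0 then ps.getD lr.2 0
     else -1) = pvScanB ps index := by
  have hlen : 0 < ps.length := List.length_pos_iff.2 hne
  obtain ⟨h1, h2, h3, h4, h5⟩ :=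
    pvLoopA_inv ps index 0 (ps.length - 1) (by omega) (by omega)
      (Or.inl rfl) (Or.inl rfl)
  set lr := pvLoopA ps index 0 (ps.length - 1) with hlr
  have hr2 : lr.2 < ps.length := by omega
  have hr1 : lr.1 < ps.length := by omega
  by_cases c1 : index ≤ ps.getD lr.1 0
  · rw [if_pos c1]
    rcases h4 with h0 | hle
    · -- lr.1 = 0: first element already ≥ index
      exact (pvScanB_first hr1 (fun j hj => by omega) c1).symm
    · -- ps[lr.1] = index
      have hv : ps.getD lr.1 0 = index := le_antisymm hle c1
      rw [hv]; exact (pvScanB_eq_of_val hs hr1 hv).symm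
  · rw [if_neg c1]
    have hlt1 : ps.getD lr.1 0 < index := not_le.1 c1
    by_cases c2 : index ≤ ps.getD lr.2 0
    · rw [if_pos c2]
      have hne12 : lr.1 ≠ lr.2 := by
        intro h; rw [h] at hlt1; omega
      have h21 : lr.2 = lr.1 + 1 := by omega
      refine (pvScanB_first hr2 (fun j hj => ?_) c2).symm
      have hj1 : j ≤ lr.1 := by omega
      exact lt_of_le_of_lt (pvSorted_mono hs hj1 hr1) hlt1
    · rw [if_neg c2]
      have hlt2 : ps.getD lr.2 0 < index := not_le.1 c2
      have hend : lr.2 = ps.length - 1 := by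
        rcases h5 with h | h
        · exact h
        · omega
      refine (pvScanB_neg fun p hp => ?_).symm
      obtain ⟨i, hi, rfl⟩ := List.mem_iff_getElem.1 hp
      have hgd : ps[i] = ps.getD i 0 := by
        simp [List.getD_eq_getElem?_getD, hi]
      rw [hgd]
      exact lt_of_le_of_lt (pvSorted_mono hs (by omega) hr2) hlt2

-- on lists of length ≤ 2 the binary search degenerates: A checks the (at most two) elements directly
lemma pvSmall (ps : List Int) (index : Int) (hne : ps ≠ []) (h : ps.length ≤ 2) :
    (let lr := pvLoopA ps index 0 (ps.length - 1)
     if index ≤ ps.getD lr.1 0 then ps.getD lr.1 0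
     else if index ≤ ps.getD lr.2 0 then ps.getD lr.2 0
     else -1) = pvScanB ps index := by
  match ps with
  | [] => exact absurd rfl hne
  | [a] =>
    rw [pvLoopA]
    simp only [List.length_cons, List.length_nil]
    norm_num [pvScanB]
    omega
  | [a, b] =>
    rw [pvLoopA]
    simp only [List.length_cons, List.length_nil]
    norm_num [pvScanB]
  | a :: b :: c :: t => simp at h

-- if index is larger than every stored position, every final check fails: A returns -1, as does the scan
lemma pvAllLt (ps : List Int) (index : Int) (hne : ps ≠ []) (h : ∀ p ∈ ps, p < index) :
    (let lr := pvLoopA ps index 0 (ps.length - 1)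
     if index ≤ ps.getD lr.1 0 then ps.getD lr.1 0
     else if index ≤ ps.getD lr.2 0 then ps.getD lr.2 0
     else -1) = pvScanB ps index := by
  have hlen : 0 < ps.length := List.length_pos_iff.2 hne
  obtain ⟨h1, h2, _, _, _⟩ :=
    pvLoopA_inv ps index 0 (ps.length - 1) (by omega) (by omega) (Or.inl rfl) (Or.inl rfl)
  set lr := pvLoopA ps index 0 (ps.length - 1) with hlr
  have hmem : ∀ i, i < ps.length → ps.getD i 0 < index := by
    intro i hi
    have : ps.getD i 0 = ps[i] := by simp [List.getD_eq_getElem?_getD, hi]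
    rw [this]
    exact h _ (List.getElem_mem hi)
  rw [if_neg (not_le.2 (hmem lr.1 (by omega))), if_neg (not_le.2 (hmem lr.2 (by omega)))]
  exact (pvScanB_neg h).symm

-- if index is strictly below every stored position, left never moves
lemma pvLoopA_left_fixed (ps : List Int) (index : Int) (h : ∀ p ∈ ps, index < p) :
    ∀ l r, r < ps.length → (pvLoopA ps index l r).1 = l := by
  intro l r
  induction l, r using pvLoopA.induct ps index with
  | case1 l r hcond mid hm ih =>
    intro hr
    have hmlt : mid < ps.length := by omega
    have : ps.getD mid 0 = ps[mid] := by simp [List.getD_eq_getElem?_getD, hmlt]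
    rw [this] at hm
    exact absurd hm (not_le.2 (h _ (List.getElem_mem hmlt)))
  | case2 l r hcond mid hm ih =>
    intro hr
    rw [pvLoopA, if_pos hcond]
    have hm' : ¬ ps.getD ((l + r) / 2) 0 ≤ index := hm
    rw [if_neg hm']
    exact ih (by omega)
  | case3 l r hcond =>
    intro _
    rw [pvLoopA, if_neg hcond]

-- if index is strictly below every stored position, both return the first element
lemma pvAllGt (ps : List Int) (index : Int) (hne : ps ≠ []) (h : ∀ p ∈ ps, index < p) :
    (let lr := pvLoopA ps index 0 (ps.length - 1)
     if index ≤ ps.getD lr.1 0 then ps.getD lr.1 0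
     else if index ≤ ps.getD lr.2 0 then ps.getD lr.2 0
     else -1) = pvScanB ps index := by
  have hlen : 0 < ps.length := List.length_pos_iff.2 hne
  have hl0 : (pvLoopA ps index 0 (ps.length - 1)).1 = 0 :=
    pvLoopA_left_fixed ps index h 0 (ps.length - 1) (by omega)
  match ps, hne, h, hl0 with
  | p :: rest, _, h, hl0 =>
    have hp : index ≤ p := le_of_lt (h p (by simp))
    simp only [hl0, List.getD_cons_zero, if_pos hp, pvScanB]

-- ===== VERDICT (by name: the statement is the Claim_ definition above) =====
theorem find_next_position_spec : Claim_equal_find_next_position := by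
  intro char index positions _ hpre
  obtain ⟨hsome, hpre2⟩ := hpre
  unfold Spec_find_next_position find_next_position find_next_position_alt
  set ps := pvPoss char positions with hps
  by_cases hne : ps = []
  · simp only [hne]
    rfl
  · simp only [if_neg hne]
    rcases hpre2 with hsmall | hsorted | hlt | hgt
    · exact pvSmall ps index hne (by simpa [pvPoss, hps] using hsmall)
    · exact pvCore ps index hne (by simpa [pvPoss, hps] using hsorted)
    · exact pvAllLt ps index hne (by simpa [pvPoss, hps] using hlt)
    · exact pvAllGt ps index hne (by simpa [pvPoss, hps] using hgt)
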